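-- pv_equiv track=rewrite | github.com/pypi-data/pypi-mirror-401 | packages/sigil-pipeline/sigil_pipeline-2.6.1.tar.gz/sigil_pipeline-2.6.1/sigil_pipeline/utils.py | check_license_compliance
-- ===== SOURCE A (Python) =====
-- def check_license_compliance(license_str: str, allowed_list: list[str]) -> bool:
--     """
--     Check if a license string (possibly SPDX expression) matches any allowed license.
--
--     Handles SPDX expressions like "MIT OR Apache-2.0" by splitting on OR/AND
--     and checking if any component matches the allowlist.
--
--     Args:
--         license_str: License string from Cargo.toml or crates.io (may be SPDX expression)
--         allowed_list: List of allowed license names (e.g., ["MIT", "Apache-2.0"])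
--
--     Returns:
--         True if license is allowed, False otherwise
--     """
--     if not license_str or not allowed_list:
--         return False
--
--     # Normalize input: lowercase, strip whitespace
--     license_normalized = license_str.strip().lower()
--
--     # Normalize allowed list
--     allowed_normalized = {
--         lic.lower().strip().replace("-", "").replace("_", "") for lic in allowed_list
--     }
--
--     # Handle SPDX expressions: split on " OR " or " AND " or "/"
--     # Common patterns: "MIT OR Apache-2.0", "MIT/Apache-2.0", "MIT AND Apache-2.0"
--     separators = [" or ", " and ", "/"]
--     components = [license_normalized]
--
--     for sep in separators:
--         new_components = []
--         for comp in components: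
--             new_components.extend(part.strip() for part in comp.split(sep))
--         components = new_components
--
--     # Check if any component matches an allowed license
--     for component in components:
--         component_clean = component.replace("-", "").replace("_", "")
--         if component_clean in allowed_normalized:
--             return True
--
--     # Also check exact match (normalized)
--     license_clean = license_normalized.replace("-", "").replace("_", "")
--     return license_clean in allowed_normalized
-- ===== SOURCE B (Python) =====
-- def check_license_compliance(license_str: str, allowed_list: list[str]) -> bool:
--     if not license_str or not allowed_list:
--         return False
--
--     allowed = {lic.lower().strip().replace("-", "").replace("_", "") for lic in allowed_list}
--     norm = license_str.strip().lower()
--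
--     def clean(s: str) -> str:
--         return s.replace("-", "").replace("_", "")
--
--     # Depth-first recursion over the separator list with early exit, instead of
--     # building the whole component list in one breadth-first pass per separator.
--     def any_component_allowed(s: str, seps: list[str]) -> bool:
--         if not seps:
--             return clean(s) in allowed
--         return any(any_component_allowed(p.strip(), seps[1:]) for p in s.split(seps[0]))
--
--     return any_component_allowed(norm, [" or ", " and ", "/"]) or clean(norm) in allowed
-- ===== Notes on version B (the rewrite author's own statement) =====
-- stated objective: alternative
-- what changed: A builds the full component list breadth-first with one full pass (and an intermediate list) per separator and then scans it; B recurses depth-first over the separator list with an early-exit any(), never materialising the component list.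
import Mathlib
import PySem

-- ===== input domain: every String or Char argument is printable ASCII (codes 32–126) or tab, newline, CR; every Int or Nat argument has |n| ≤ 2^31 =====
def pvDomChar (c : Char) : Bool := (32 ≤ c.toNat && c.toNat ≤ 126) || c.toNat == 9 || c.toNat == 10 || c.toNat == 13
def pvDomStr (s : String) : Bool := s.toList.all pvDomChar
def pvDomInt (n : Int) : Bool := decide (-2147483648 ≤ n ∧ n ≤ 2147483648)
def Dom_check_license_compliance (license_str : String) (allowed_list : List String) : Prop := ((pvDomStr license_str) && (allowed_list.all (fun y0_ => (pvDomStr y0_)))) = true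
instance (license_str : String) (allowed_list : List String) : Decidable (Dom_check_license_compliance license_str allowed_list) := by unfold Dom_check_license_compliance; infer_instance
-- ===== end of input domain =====

-- B replaces A's breadth-first component construction (one full pass per separator over a
-- growing list) by a depth-first recursion over the separator list with early exit (objective: alternative).

-- ===== PORT A =====
def check_license_compliance (license_str : String) (allowed_list : List String) : Bool :=
  if license_str = "" ∨ allowed_list = [] then false
  else
    let license_normalized := PySem.Str.lower (PySem.Str.strip license_str)
    let allowed_normalized : PySem.Set String :=
      PySem.Set.ofList (allowed_list.map (fun lic => PySem.Str.replace (PySem.Str.replace (PySem.Str.strip (PySem.Str.lower lic)) "-" "") "_" ""))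
    let separators := [" or ", " and ", "/"]
    let components := separators.foldl
      (fun comps sep => comps.flatMap (fun comp => ((PySem.Str.split? comp sep).getD []).map PySem.Str.strip))
      [license_normalized]
    if components.any (fun component => PySem.Set.contains allowed_normalized (PySem.Str.replace (PySem.Str.replace component "-" "") "_" "")) then
      true
    else
      PySem.Set.contains allowed_normalized (PySem.Str.replace (PySem.Str.replace license_normalized "-" "") "_" "")

-- ===== PORT B =====
def pvCleanB (s : String) : String :=
  PySem.Str.replace (PySem.Str.replace s "-" "") "_" ""

def pvAnyComponentAllowed (allowed : PySem.Set String) : String → List String → Bool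
  | s, [] => PySem.Set.contains allowed (pvCleanB s)
  | s, sep :: rest =>
      ((PySem.Str.split? s sep).getD []).any (fun p => pvAnyComponentAllowed allowed (PySem.Str.strip p) rest)

def check_license_compliance_alt (license_str : String) (allowed_list : List String) : Bool :=
  if license_str = "" ∨ allowed_list = [] then false
  else
    let allowed : PySem.Set String :=
      PySem.Set.ofList (allowed_list.map (fun lic => pvCleanB (PySem.Str.strip (PySem.Str.lower lic))))
    let norm := PySem.Str.lower (PySem.Str.strip license_str)
    pvAnyComponentAllowed allowed norm [" or ", " and ", "/"]
      || PySem.Set.contains allowed (pvCleanB norm)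

-- ===== PRECONDITION & SPEC =====
def Spec_check_license_compliance (license_str : String) (allowed_list : List String) (out : Bool) : Prop := out = check_license_compliance_alt license_str allowed_list
instance (license_str : String) (allowed_list : List String) (out : Bool) : Decidable (Spec_check_license_compliance license_str allowed_list out) := by unfold Spec_check_license_compliance; infer_instance

-- ===== CLAIM (what is proved, stated in full; the proofs are below) =====
def Claim_equal_check_license_compliance : Prop := ∀ (license_str : String) (allowed_list : List String), Dom_check_license_compliance license_str allowed_list → Spec_check_license_compliance license_str allowed_list (check_license_compliance license_str allowed_list)

-- ===== LEMMAS AND PROOFS =====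
theorem pv_any_flatMap {α β : Type} (l : List α) (f : α → List β) (p : β → Bool) :
    ((l.flatMap f).any p) = l.any (fun x => (f x).any p) := by
  induction l with
  | nil => rfl
  | cons a t ih => simp [List.flatMap_cons, List.any_append, ih]

-- ===== VERDICT (by name: the statement is the Claim_ definition above) =====
theorem check_license_compliance_spec : Claim_equal_check_license_compliance := by
  intro license_str allowed_list _
  unfold Spec_check_license_compliance check_license_compliance check_license_compliance_alt
  by_cases h : license_str = "" ∨ allowed_list = []
  · simp [h]
  · simp only [h, if_false, pvAnyComponentAllowed, pvCleanB,
      List.foldl, pv_any_flatMap, List.any_map]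
    split
    · simp_all
    · rename_i hfail
      simp_all
      intro x hx y hy z hz w hw heq
      exact absurd heq (hfail x hx y hy z hz w hw)
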